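-- pv_equiv track=rewrite | github.com/Feareis/epsi-dev-fs-python | plate.py | generate_simple_board
-- ===== SOURCE A (Python) =====
-- def generate_simple_board(board_height, board_width, bricks_position):
--     """
--     Creates a game board with empty cells, indestructible walls, and breakable bricks.
--
--     :param board_height: The number of rows on the board.
--     :param board_width: The number of columns on the board.
--     :param bricks_position: A list of (x, y) tuples representing the positions of breakable bricks.
--     :return: A 2D list representing the game board.
--     """
--     # Initialize the board as an empty list to store rows
--     plate = []
--
--     # Create the board layout with empty cells and indestructible walls in a checkerboard pattern
--     for i in range(board_height):
--         if i % 2 == 0: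
--             # Row with only empty cells (" ")
--             row = [" " for _ in range(board_width)]
--         else:
--             # Row with indestructible walls ("X") on odd columns
--             row = ["X" if j % 2 != 0 else " " for j in range(board_width)]
--         plate.append(row)
--
--     # Place breakable bricks at specified positions
--     for (x, y) in bricks_position:
--         # Check that the brick position is within the board boundaries
--         if 0 <= x < board_height and 0 <= y < board_width:
--             plate[x][y] = "B"  # "B" represents a breakable brick
--
--     return plate
-- ===== SOURCE B (Python) =====
-- def generate_simple_board(board_height, board_width, bricks_position):
--     bricks = {(x, y) for (x, y) in bricks_position
--               if 0 <= x < board_height and 0 <= y < board_width}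
--     return [["B" if (i, j) in bricks
--              else "X" if i % 2 == 1 and j % 2 == 1
--              else " "
--              for j in range(board_width)]
--             for i in range(board_height)]
-- ===== Notes on version B (the rewrite author's own statement) =====
-- stated objective: simpler
-- what changed: Replaces the two-pass build-then-overwrite (build checkerboard rows, then mutate cells per brick) with a set of valid brick coordinates built once and a single nested comprehension that decides each cell (brick / wall / empty) directly.
import Mathlib
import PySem

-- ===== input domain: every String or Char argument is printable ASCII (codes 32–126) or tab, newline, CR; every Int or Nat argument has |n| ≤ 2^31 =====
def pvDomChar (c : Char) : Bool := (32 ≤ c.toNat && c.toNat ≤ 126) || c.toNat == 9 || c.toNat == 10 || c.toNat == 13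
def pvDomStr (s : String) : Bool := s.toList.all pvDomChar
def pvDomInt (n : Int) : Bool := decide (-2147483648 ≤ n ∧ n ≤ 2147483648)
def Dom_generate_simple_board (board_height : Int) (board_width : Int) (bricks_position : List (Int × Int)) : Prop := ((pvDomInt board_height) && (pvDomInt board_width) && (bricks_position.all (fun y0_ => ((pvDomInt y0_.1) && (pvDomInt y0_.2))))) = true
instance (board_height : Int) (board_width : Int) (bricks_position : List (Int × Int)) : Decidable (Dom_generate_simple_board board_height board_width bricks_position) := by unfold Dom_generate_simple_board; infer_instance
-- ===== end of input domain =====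

-- B replaces A's build-then-overwrite (checkerboard rows, then per-brick mutation) with one
-- nested comprehension whose per-cell decision uses a set of valid brick coordinates (simpler).

-- ===== PORT A =====
-- row built in A's first loop: empty row for even i, walls on odd columns for odd i
def pvInitRow (board_width : Int) (i : Int) : List String :=
  if i % 2 == 0 then (PySem.List.pyRange 0 board_width 1).map (fun _ => " ")
  else (PySem.List.pyRange 0 board_width 1).map (fun j => if j % 2 != 0 then "X" else " ")

-- body of A's second loop: 'plate[x][y] = "B"' under the bounds check
def pvPlace (board_height board_width : Int) (plate : List (List String)) (p : Int × Int) : List (List String) :=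
  if 0 ≤ p.1 ∧ p.1 < board_height ∧ 0 ≤ p.2 ∧ p.2 < board_width then
    PySem.List.pySetD plate p.1 (PySem.List.pySetD (PySem.List.pyGetD plate p.1 []) p.2 "B")
  else plate

def generate_simple_board (board_height : Int) (board_width : Int) (bricks_position : List (Int × Int)) : List (List String) :=
  bricks_position.foldl (pvPlace board_height board_width)
    ((PySem.List.pyRange 0 board_height 1).map (pvInitRow board_width))

-- ===== PORT B =====
def pvInBounds (board_height board_width : Int) (p : Int × Int) : Bool :=
  decide (0 ≤ p.1) && decide (p.1 < board_height) && decide (0 ≤ p.2) && decide (p.2 < board_width)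

def pvCell (bricks : PySem.Set (Int × Int)) (i j : Int) : String :=
  if (i, j) ∈ bricks then "B"
  else if i % 2 == 1 && j % 2 == 1 then "X" else " "

def generate_simple_board_alt (board_height : Int) (board_width : Int) (bricks_position : List (Int × Int)) : List (List String) :=
  let bricks := PySem.Set.ofList (bricks_position.filter (pvInBounds board_height board_width))
  (PySem.List.pyRange 0 board_height 1).map (fun i =>
    (PySem.List.pyRange 0 board_width 1).map (fun j => pvCell bricks i j))

-- ===== PRECONDITION & SPEC =====
def Spec_generate_simple_board (board_height : Int) (board_width : Int) (bricks_position : List (Int × Int)) (out : List (List String)) : Prop := out = generate_simple_board_alt board_height board_width bricks_position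
instance (board_height : Int) (board_width : Int) (bricks_position : List (Int × Int)) (out : List (List String)) : Decidable (Spec_generate_simple_board board_height board_width bricks_position out) := by unfold Spec_generate_simple_board; infer_instance

-- ===== CLAIM (what is proved, stated in full; the proofs are below) =====
def Claim_equal_generate_simple_board : Prop := ∀ (board_height : Int) (board_width : Int) (bricks_position : List (Int × Int)), Dom_generate_simple_board board_height board_width bricks_position → Spec_generate_simple_board board_height board_width bricks_position (generate_simple_board board_height board_width bricks_position)

-- ===== LEMMAS AND PROOFS =====

-- board described by a cell function
def pvBoard (h w : Int) (f : Int → Int → String) : List (List String) :=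
  (PySem.List.pyRange 0 h 1).map (fun i => (PySem.List.pyRange 0 w 1).map (f i))

lemma pvBoard_congr {h w : Int} {f g : Int → Int → String}
    (hfg : ∀ i, 0 ≤ i → i < h → ∀ j, 0 ≤ j → j < w → f i j = g i j) :
    pvBoard h w f = pvBoard h w g := by
  unfold pvBoard
  apply List.map_congr_left
  intro i hi
  rw [PySem.List.mem_pyRange_one] at hi
  apply List.map_congr_left
  intro j hj
  rw [PySem.List.mem_pyRange_one] at hj
  exact hfg i hi.1 hi.2 j hj.1 hj.2

lemma pv_set_map_nodup {α : Type} (L : List Int) (f : Int → α) (hnd : L.Nodup) (k : Nat)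
    (hk : k < L.length) (v : α) :
    (L.map f).set k v = L.map fun i => if i = L[k] then v else f i := by
  apply List.ext_getElem
  · simp
  · intro m h1 h2
    simp only [List.length_set, List.length_map] at h1 h2
    rw [List.getElem_set, List.getElem_map]
    by_cases hm : k = m
    · subst hm; simp
    · rw [if_neg hm, List.getElem_map, if_neg]
      intro he
      exact hm (hnd.getElem_inj_iff.mp he).symm

lemma pvPlace_board (h w x y : Int) (f : Int → Int → String)
    (hx : 0 ≤ x) (hx2 : x < h) (hy : 0 ≤ y) (hy2 : y < w) :
    pvPlace h w (pvBoard h w f) (x, y) =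
      pvBoard h w (fun i j => if i = x ∧ j = y then "B" else f i j) := by
  unfold pvPlace
  dsimp only
  rw [if_pos ⟨hx, hx2, hy, hy2⟩]
  unfold pvBoard
  rw [PySem.List.pyGetD_map_pyRange_of_nonneg _ _ _ _ hx hx2]
  rw [PySem.List.pySetD_of_nonneg _ _ hy, PySem.List.pySetD_of_nonneg _ _ hx]
  have hylen : y.toNat < (PySem.List.pyRange 0 w 1).length := by
    rw [PySem.List.length_pyRange_one]; omega
  have hxlen : x.toNat < (PySem.List.pyRange 0 h 1).length := by
    rw [PySem.List.length_pyRange_one]; omega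
  have hyget : (PySem.List.pyRange 0 w 1)[y.toNat] = y := by
    rw [PySem.List.getElem_pyRange_one]; omega
  have hxget : (PySem.List.pyRange 0 h 1)[x.toNat] = x := by
    rw [PySem.List.getElem_pyRange_one]; omega
  rw [pv_set_map_nodup _ _ (PySem.List.nodup_pyRange_one 0 w) y.toNat hylen, hyget]
  rw [pv_set_map_nodup _ _ (PySem.List.nodup_pyRange_one 0 h) x.toNat hxlen, hxget]
  apply List.map_congr_left
  intro i _
  by_cases hix : i = x
  · subst hix
    rw [if_pos rfl]
    apply List.map_congr_left
    intro j _
    by_cases hjy : j = y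
    · subst hjy; simp
    · simp [hjy]
  · rw [if_neg hix]
    apply List.map_congr_left
    intro j _
    simp [hix]

-- the initial board of A as a pvBoard
lemma pvInit_eq : ∀ (h w : Int),
    (PySem.List.pyRange 0 h 1).map (pvInitRow w) =
      pvBoard h w (fun i j => if i % 2 == 0 then " " else if j % 2 != 0 then "X" else " ") := by
  intro h w
  unfold pvBoard
  apply List.map_congr_left
  intro i _
  by_cases hi : i % 2 == 0 <;> simp [pvInitRow, hi]

-- characterization of A's brick-placing loop over any pvBoard
lemma pvFold_eq (h w : Int) (l : List (Int × Int)) (f : Int → Int → String) :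
    l.foldl (pvPlace h w) (pvBoard h w f) =
      pvBoard h w (fun i j =>
        if (i, j) ∈ PySem.Set.ofList (l.filter (pvInBounds h w)) then "B" else f i j) := by
  induction l using List.reverseRecOn generalizing f with
  | nil =>
    simp only [List.foldl_nil, List.filter_nil]
    apply pvBoard_congr
    intro i _ _ j _ _
    rw [if_neg]
    simp
  | append_singleton l' p ih =>
    rw [List.foldl_append, List.foldl_cons, List.foldl_nil, ih]
    obtain ⟨x, y⟩ := p
    by_cases hp : 0 ≤ x ∧ x < h ∧ 0 ≤ y ∧ y < w
    · rw [pvPlace_board h w x y _ hp.1 hp.2.1 hp.2.2.1 hp.2.2.2]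
      apply pvBoard_congr
      intro i _ _ j _ _
      have hmem : ((i, j) ∈ PySem.Set.ofList ((l' ++ [(x, y)]).filter (pvInBounds h w))) ↔
          ((i, j) ∈ PySem.Set.ofList (l'.filter (pvInBounds h w)) ∨ (i = x ∧ j = y)) := by
        rw [PySem.Set.mem_ofList, PySem.Set.mem_ofList, List.filter_append, List.mem_append,
          List.filter_cons, List.filter_nil,
          if_pos (by simp only [pvInBounds]; simp; omega : pvInBounds h w (x, y) = true)]
        simp [Prod.ext_iff]
      by_cases hij : i = x ∧ j = y
      · rw [if_pos hij, if_pos (hmem.mpr (Or.inr hij))]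
      · rw [if_neg hij]
        by_cases hm : (i, j) ∈ PySem.Set.ofList (l'.filter (pvInBounds h w))
        · rw [if_pos hm, if_pos (hmem.mpr (Or.inl hm))]
        · rw [if_neg hm, if_neg]
          intro hc
          rcases hmem.mp hc with h' | h'
          · exact hm h'
          · exact hij h'
    · have hnb : pvInBounds h w (x, y) = false := by
        simp only [pvInBounds, Bool.and_eq_false_iff, decide_eq_false_iff_not]
        by_cases h1 : 0 ≤ x
        · by_cases h2 : x < h
          · by_cases h3 : 0 ≤ y
            · right; omega
            · left; right; exact h3
          · left; left; right; exact h2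
        · left; left; left; exact h1
      have : pvPlace h w (pvBoard h w fun i j =>
          if (i, j) ∈ PySem.Set.ofList (l'.filter (pvInBounds h w)) then "B" else f i j) (x, y) =
          pvBoard h w fun i j =>
          if (i, j) ∈ PySem.Set.ofList (l'.filter (pvInBounds h w)) then "B" else f i j := by
        unfold pvPlace
        rw [if_neg hp]
      rw [this]
      have hfilt : ((l' ++ [(x, y)]).filter (pvInBounds h w)) = l'.filter (pvInBounds h w) := by
        rw [List.filter_append, List.filter_cons, List.filter_nil, if_neg (by simp [hnb])]
        simp
      rw [hfilt]

-- ===== VERDICT (by name: the statement is the Claim_ definition above) =====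
theorem generate_simple_board_spec : Claim_equal_generate_simple_board := by
  intro h w bricks _
  unfold Spec_generate_simple_board generate_simple_board generate_simple_board_alt
  rw [pvInit_eq, pvFold_eq]
  show _ = pvBoard h w _
  apply pvBoard_congr
  intro i hi _ j hj _
  unfold pvCell
  by_cases hm : (i, j) ∈ PySem.Set.ofList (bricks.filter (pvInBounds h w))
  · simp [hm]
  · have h2 : i % 2 = 0 ∨ i % 2 = 1 := by omega
    have h2' : j % 2 = 0 ∨ j % 2 = 1 := by omega
    rcases h2 with h2 | h2 <;> rcases h2' with h2' | h2' <;> simp [hm, h2, h2']
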